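-- pv_equiv track=rewrite | github.com/rdzw/EQUIPE_LINUS_ZLACADEMY | semana-2/lista-01/Questao6.py | organizar_numeros
-- ===== SOURCE A (Python) =====
-- def organizar_numeros(numeros):
--     pares = []
--     impares = []
--
--     for num in numeros:
--         if num % 2 == 0:
--             pares.append(num)
--         else:
--             impares.append(num)
--
--     pares.sort()
--     impares.sort(reverse=True)
--
--     return pares + impares
-- ===== SOURCE B (Python) =====
-- def organizar_numeros(numeros):
--     def merge(a, b):
--         r = []
--         i = j = 0
--         while i < len(a) and j < len(b):
--             if b[j] < a[i]:
--                 r.append(b[j]); j += 1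
--             else:
--                 r.append(a[i]); i += 1
--         return r + a[i:] + b[j:]
--
--     def msort(xs):
--         if len(xs) <= 1:
--             return xs[:]
--         meio = len(xs) // 2
--         return merge(msort(xs[:meio]), msort(xs[meio:]))
--
--     ordenados = msort(numeros)
--     pares = [x for x in ordenados if x % 2 == 0]
--     impares = [x for x in ordenados if x % 2 != 0]
--     impares.reverse()
--     return pares + impares
-- ===== Notes on version B (the rewrite author's own statement) =====
-- stated objective: alternative
-- what changed: Sorts the whole list once with a hand-written top-down merge sort, then derives evens (already ascending) and odds (reversed to descending) by two filter passes over that one sorted list, instead of A's partition-first-then-two-library-sorts.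
import Mathlib
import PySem

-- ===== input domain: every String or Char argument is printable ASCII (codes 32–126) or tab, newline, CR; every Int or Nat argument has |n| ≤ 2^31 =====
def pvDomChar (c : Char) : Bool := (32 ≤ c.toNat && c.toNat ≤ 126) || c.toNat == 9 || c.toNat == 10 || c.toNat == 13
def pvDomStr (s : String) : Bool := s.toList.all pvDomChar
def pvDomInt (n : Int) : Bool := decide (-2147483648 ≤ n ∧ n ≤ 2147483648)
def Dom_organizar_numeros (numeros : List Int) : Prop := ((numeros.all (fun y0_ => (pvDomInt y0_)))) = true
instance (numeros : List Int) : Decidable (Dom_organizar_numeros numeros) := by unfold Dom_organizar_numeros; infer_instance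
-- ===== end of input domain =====

-- B sorts the whole list once with a hand-written merge sort and then filters it
-- into evens (ascending as-is) and odds (reversed to descending), instead of A's
-- partition-first-then-two-library-sorts.

-- ===== PORT A =====
-- the loop appending each number to pares/impares, carried as a pair
def organizar_numeros (numeros : List Int) : List Int :=
  let pq := numeros.foldl
    (fun (pq : List Int × List Int) num =>
      if PySem.Int.mod num 2 == 0 then (pq.1 ++ [num], pq.2) else (pq.1, pq.2 ++ [num]))
    ([], [])
  PySem.List.sorted pq.1 (fun x => x) false ++ PySem.List.sorted pq.2 (fun x => x) true

-- ===== PORT B =====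
-- merge(a, b): the while loop taking the strictly smaller head from b, else from a,
-- then the leftovers of both
def pvMerge (a b : List Int) : List Int :=
  match a, b with
  | [], b => b
  | a, [] => a
  | x :: a', y :: b' =>
    if y < x then y :: pvMerge (x :: a') b' else x :: pvMerge a' (y :: b')
termination_by a.length + b.length

-- msort(xs): split at len//2 and merge the sorted halves
def pvMsort (xs : List Int) : List Int :=
  if h : xs.length ≤ 1 then xs
  else
    let meio := xs.length / 2
    pvMerge (pvMsort (xs.take meio)) (pvMsort (xs.drop meio))
termination_by xs.length
decreasing_by
  · simp only [List.length_take]; omega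
  · simp only [List.length_drop]; omega

def organizar_numeros_alt (numeros : List Int) : List Int :=
  let ordenados := pvMsort numeros
  let pares := ordenados.filter (fun x => PySem.Int.mod x 2 == 0)
  let impares := ordenados.filter (fun x => PySem.Int.mod x 2 != 0)
  pares ++ impares.reverse

-- ===== PRECONDITION & SPEC =====
def Spec_organizar_numeros (numeros : List Int) (out : List Int) : Prop := out = organizar_numeros_alt numeros
instance (numeros : List Int) (out : List Int) : Decidable (Spec_organizar_numeros numeros out) := by unfold Spec_organizar_numeros; infer_instance

-- ===== CLAIM =====
def Claim_equal_organizar_numeros : Prop := ∀ (numeros : List Int), Dom_organizar_numeros numeros → Spec_organizar_numeros numeros (organizar_numeros numeros)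

-- ===== LEMMAS AND PROOFS =====

theorem pvMerge_perm (a b : List Int) : (pvMerge a b).Perm (a ++ b) := by
  fun_induction pvMerge a b with
  | case1 b => simp
  | case2 a => simp
  | case3 x a' y b' h ih =>
    simpa [pvMerge, h] using (ih.cons y).trans (List.perm_middle).symm
  | case4 x a' y b' h ih =>
    simpa [pvMerge, h] using ih.cons x

theorem pvMerge_pairwise (a b : List Int)
    (ha : a.Pairwise (· ≤ ·)) (hb : b.Pairwise (· ≤ ·)) :
    (pvMerge a b).Pairwise (· ≤ ·) := by
  fun_induction pvMerge a b with
  | case1 b => simpa [pvMerge]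
  | case2 a => simpa [pvMerge] using ha
  | case3 x a' y b' h ih =>
    rw [List.pairwise_cons] at hb
    refine List.pairwise_cons.mpr ⟨?_, ih ha hb.2⟩
    intro z hz
    have hz' := (pvMerge_perm (x :: a') b').mem_iff.mp hz
    simp only [List.mem_append, List.mem_cons] at hz'
    rcases hz' with (rfl | hz') | hz'
    · omega
    · have := (List.pairwise_cons.mp ha).1 z hz'; omega
    · exact hb.1 z hz'
  | case4 x a' y b' h ih =>
    rw [List.pairwise_cons] at ha
    refine List.pairwise_cons.mpr ⟨?_, ih ha.2 hb⟩
    intro z hz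
    have hz' := (pvMerge_perm a' (y :: b')).mem_iff.mp hz
    simp only [List.mem_append, List.mem_cons] at hz'
    rcases hz' with hz' | (rfl | hz')
    · exact ha.1 z hz'
    · omega
    · have := (List.pairwise_cons.mp hb).1 z hz'; omega

theorem pvMsort_perm (xs : List Int) : (pvMsort xs).Perm xs := by
  fun_induction pvMsort xs with
  | case1 xs h => exact List.Perm.refl xs
  | case2 xs h meio ih1 ih2 =>
    refine ((pvMerge_perm _ _).trans (ih1.append ih2)).trans ?_
    rw [List.take_append_drop]

theorem pvMsort_pairwise (xs : List Int) : (pvMsort xs).Pairwise (· ≤ ·) := by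
  fun_induction pvMsort xs with
  | case1 xs h =>
    match xs, h with
    | [], _ => simp
    | [x], _ => simp
  | case2 xs h meio ih1 ih2 => exact pvMerge_pairwise _ _ ih1 ih2

theorem pvMsort_eq_sorted (xs : List Int) :
    pvMsort xs = PySem.List.sorted xs (fun x => x) false := by
  symm
  apply PySem.List.sorted_id_eq_of_perm_of_pairwise
  · exact pvMsort_perm xs
  · exact pvMsort_pairwise xs

-- A's partition loop computes (filter even, filter odd)
theorem pv_partition (xs : List Int) (p q : List Int) :
    xs.foldl
      (fun (pq : List Int × List Int) num =>
        if PySem.Int.mod num 2 == 0 then (pq.1 ++ [num], pq.2) else (pq.1, pq.2 ++ [num]))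
      (p, q)
    = (p ++ xs.filter (fun num => PySem.Int.mod num 2 == 0),
       q ++ xs.filter (fun num => !(PySem.Int.mod num 2 == 0))) := by
  induction xs generalizing p q with
  | nil => simp
  | cons x xs ih =>
    simp only [List.foldl_cons, List.filter_cons]
    by_cases h : PySem.Int.mod x 2 == 0 <;>
      simp only [h, if_true, if_false, Bool.not_true, Bool.not_false, Bool.false_eq_true,
        ih, List.append_assoc, List.singleton_append]

-- sorting a filtered list = filtering the sorted list (elements are their own keys)
theorem pv_sorted_filter (xs : List Int) (p : Int → Bool) :
    PySem.List.sorted (xs.filter p) (fun x => x) false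
      = (PySem.List.sorted xs (fun x => x) false).filter p := by
  apply PySem.List.sorted_id_eq_of_perm_of_pairwise
  · exact (PySem.List.sorted_perm xs (fun x => x) false).filter p
  · exact (PySem.List.sorted_pairwise xs (fun x => x)).filter _

-- descending sort of a filtered list = reverse of the filtered ascending sort
theorem pv_sorted_rev_filter (xs : List Int) (p : Int → Bool) :
    PySem.List.sorted (xs.filter p) (fun x => x) true
      = ((PySem.List.sorted xs (fun x => x) false).filter p).reverse := by
  apply PySem.List.eq_of_perm_of_pairwise_le_of_injective (fun x : Int => -x) neg_injective
  · exact (PySem.List.sorted_perm (xs.filter p) (fun x => x) true).trans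
      (((List.reverse_perm _).trans ((PySem.List.sorted_perm xs (fun x => x) false).filter p)).symm)
  · exact (PySem.List.sorted_pairwise_rev (xs.filter p) (fun x => x)).imp (by omega)
  · exact (List.pairwise_reverse.mpr
      (((PySem.List.sorted_pairwise xs (fun x => x)).filter p).imp (by intro a b; omega)))

-- ===== VERDICT =====
theorem organizar_numeros_spec : Claim_equal_organizar_numeros := by
  intro numeros _
  show organizar_numeros numeros = organizar_numeros_alt numeros
  simp only [organizar_numeros, organizar_numeros_alt, pv_partition, List.nil_append,
    pvMsort_eq_sorted, bne]
  rw [pv_sorted_filter, pv_sorted_rev_filter]
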